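-- pv_equiv track=rewrite | github.com/anord-wang/CSE559HW2 | cse559code/hw2q2.py | generate_consensus
-- ===== SOURCE A (Python) =====
-- Nucleotide_Dictionary = {'A': 0, 'G': 1, 'C': 2, 'T': 3}
--
-- def get_profile(k, t, motif_list):
--     profile = [[1] * k for _ in range(4)]
--     for motif in motif_list:
--         for i in range(k):
--             if motif[i] == 'A':
--                 profile[0][i] = profile[0][i] + 1
--             elif motif[i] == 'G':
--                 profile[1][i] = profile[1][i] + 1
--             elif motif[i] == 'C':
--                 profile[2][i] = profile[2][i] + 1
--             elif motif[i] == 'T':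
--                 profile[3][i] = profile[3][i] + 1
--     profile_after = [[item / (t + 4) for item in profile[index]] for index in range(4)]
--     return profile, profile_after
--
-- def generate_consensus(k, t, motif_list):
--     profile, _ = get_profile(k, t, motif_list)
--     consensus = ''
--
--     for j in range(k):
--         threshold = 0
--         frequent_symbol = ''
--         for i in range(4):
--             if profile[i][j] > threshold:
--                 threshold = profile[i][j]
--                 frequent_symbol = list(Nucleotide_Dictionary.keys())[list(Nucleotide_Dictionary.values()).index(i)]
--         consensus = consensus + frequent_symbol
--
--     return consensus
-- ===== SOURCE B (Python) =====
-- def generate_consensus(k, t, motif_list):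
--     # Column-wise: pick the most frequent nucleotide of each column directly
--     # (max returns the FIRST maximum, preserving the A,G,C,T tie-break).
--     return ''.join(
--         max('AGCT', key=lambda c: sum(m[j] == c for m in motif_list))
--         for j in range(k)
--     )
-- ===== Notes on version B (the rewrite author's own statement) =====
-- stated objective: simpler
-- what changed: Drops the 4xk profile matrix and the keys/values reverse-lookup: the consensus is computed column by column with max('AGCT', key=count), joined across columns.
import Mathlib
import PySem

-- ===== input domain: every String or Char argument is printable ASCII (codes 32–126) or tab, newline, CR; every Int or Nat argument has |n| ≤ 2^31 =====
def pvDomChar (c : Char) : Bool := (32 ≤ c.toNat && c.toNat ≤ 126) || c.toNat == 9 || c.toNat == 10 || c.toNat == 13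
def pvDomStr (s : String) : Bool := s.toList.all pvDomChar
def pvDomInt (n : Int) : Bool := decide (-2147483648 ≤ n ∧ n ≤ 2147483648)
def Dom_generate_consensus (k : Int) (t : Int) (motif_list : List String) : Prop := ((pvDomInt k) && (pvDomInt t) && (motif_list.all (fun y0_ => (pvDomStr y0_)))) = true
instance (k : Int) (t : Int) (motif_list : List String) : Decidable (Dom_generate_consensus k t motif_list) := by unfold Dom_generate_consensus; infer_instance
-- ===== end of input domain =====

-- B drops the 4×k profile matrix and computes the consensus column by column (simpler decomposition, same cost).
-- A's get_profile also returns a float matrix profile_after that generate_consensus discards; it is not ported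
-- (floats), and the t = -4 input on which computing it divides by zero is excluded by Pre_.

-- ===== PORT A =====
-- profile[r][i] = profile[r][i] + 1  (r, i always in range in Python when Pre_ holds)
def pvBump (prof : List (List Int)) (r : Nat) (i : Int) : List (List Int) :=
  prof.modify r (fun row => row.modify i.toNat (· + 1))

-- the if/elif chain of get_profile's inner loop body; c is motif[i]
def pvStep (prof : List (List Int)) (c : Char) (i : Int) : List (List Int) :=
  if c = 'A' then pvBump prof 0 i
  else if c = 'G' then pvBump prof 1 i
  else if c = 'C' then pvBump prof 2 i
  else if c = 'T' then pvBump prof 3 i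
  else prof

-- get_profile's first component (profile_after is floats and never used by generate_consensus)
def pvGetProfile (k : Int) (motif_list : List String) : List (List Int) :=
  motif_list.foldl
    (fun prof m =>
      (PySem.List.pyRange 0 k 1).foldl
        (fun p i => pvStep p ((PySem.List.pyGet? m.toList i).getD '?') i) prof)
    [List.replicate k.toNat 1, List.replicate k.toNat 1,
     List.replicate k.toNat 1, List.replicate k.toNat 1]

-- list(Nucleotide_Dictionary.keys())[list(Nucleotide_Dictionary.values()).index(i)]
def pvNuc (i : Int) : String :=
  String.ofList [PySem.List.pyGetD ['A','G','C','T']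
    ((PySem.List.index? [(0:Int),1,2,3] i).getD 0) 'A']

def generate_consensus (k : Int) (t : Int) (motif_list : List String) : String :=
  let profile := pvGetProfile k motif_list
  (PySem.List.pyRange 0 k 1).foldl
    (fun consensus j =>
      let p := (PySem.List.pyRange 0 4 1).foldl
        (fun st i =>
          let v := PySem.List.pyGetD (PySem.List.pyGetD profile i []) j 0
          if v > st.1 then (v, pvNuc i) else st)
        ((0 : Int), "")
      consensus ++ p.2) ""

-- ===== PORT B =====
-- sum(m[j] == c for m in motif_list)
def pvCount (motif_list : List String) (j : Int) (c : Char) : Int :=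
  motif_list.foldl
    (fun acc m => acc + (if (PySem.List.pyGet? m.toList j).getD '?' = c then 1 else 0)) 0

-- ''.join(max('AGCT', key=...) for j in range(k))
def generate_consensus_alt (k : Int) (t : Int) (motif_list : List String) : String :=
  String.ofList ((PySem.List.pyRange 0 k 1).map (fun j =>
    (PySem.List.max? ['A','G','C','T'] (fun c => pvCount motif_list j c)).getD 'A'))

-- ===== PRECONDITION & SPEC =====
-- Pre_ excludes exactly the inputs on which Python A raises: a motif shorter than k
-- (IndexError on motif[i]) and t = -4 (ZeroDivisionError in the discarded profile_after).
def Pre_generate_consensus (k : Int) (t : Int) (motif_list : List String) : Prop :=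
  t ≠ -4 ∧ ∀ m ∈ motif_list, k ≤ (m.length : Int)
instance (k : Int) (t : Int) (motif_list : List String) : Decidable (Pre_generate_consensus k t motif_list) := by
  unfold Pre_generate_consensus; infer_instance
def pvWitness_generate_consensus : Int × Int × List String := (2, 0, ["AG", "AG", "CG"])

def Spec_generate_consensus (k : Int) (t : Int) (motif_list : List String) (out : String) : Prop := out = generate_consensus_alt k t motif_list
instance (k : Int) (t : Int) (motif_list : List String) (out : String) : Decidable (Spec_generate_consensus k t motif_list out) := by unfold Spec_generate_consensus; infer_instance

-- ===== CLAIM (what is proved, stated in full; the proofs are below) =====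
def Claim_equal_generate_consensus : Prop := ∀ (k : Int) (t : Int) (motif_list : List String), Dom_generate_consensus k t motif_list → Pre_generate_consensus k t motif_list → Spec_generate_consensus k t motif_list (generate_consensus k t motif_list)

-- ===== LEMMAS AND PROOFS =====

lemma modify_row (N n : Nat) (g : Nat → Int) :
    ((List.range N).map g).modify n (· + 1)
      = (List.range N).map (fun j => if j = n then g j + 1 else g j) := by
  apply List.ext_getElem
  · simp
  · intro i h1 h2
    rw [List.getElem_modify]
    simp only [List.getElem_map, List.getElem_range]
    by_cases hi : i = n
    · simp [hi]
    · rw [if_neg (fun hh => hi hh.symm), if_neg hi]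

lemma step_rows (N n : Nat) (h : n < N) (gA gG gC gT : Nat → Int) (c : Char) :
    pvStep [(List.range N).map gA, (List.range N).map gG,
            (List.range N).map gC, (List.range N).map gT] c (n : Int)
      = [(List.range N).map (fun j => if j = n ∧ c = 'A' then gA j + 1 else gA j),
         (List.range N).map (fun j => if j = n ∧ c = 'G' then gG j + 1 else gG j),
         (List.range N).map (fun j => if j = n ∧ c = 'C' then gC j + 1 else gC j),
         (List.range N).map (fun j => if j = n ∧ c = 'T' then gT j + 1 else gT j)] := by
  unfold pvStep pvBump
  have ht : ((n : Int)).toNat = n := by omega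
  by_cases hA : c = 'A'
  · simp [hA, List.modify, ht]
    exact modify_row N n gA
  by_cases hG : c = 'G'
  · simp [hG, List.modify, ht]
    exact modify_row N n gG
  by_cases hC : c = 'C'
  · simp [hC, List.modify, ht]
    exact modify_row N n gC
  by_cases hT : c = 'T'
  · simp [hT, List.modify, ht]
    exact modify_row N n gT
  · simp [hA, hG, hC, hT]

lemma row_combine (f : Nat → Char) (c : Char) (g : Nat → Int) (N n : Nat) :
    (List.range N).map (fun j => if j = n ∧ f n = c then (g j + if j < n ∧ f j = c then 1 else 0) + 1
                                 else (g j + if j < n ∧ f j = c then 1 else 0))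
      = (List.range N).map (fun j => g j + if j < n + 1 ∧ f j = c then 1 else 0) := by
  apply List.map_congr_left
  intro j hj
  by_cases hje : j = n
  · subst hje
    by_cases hc : f j = c <;> simp [hc]
  · have h1 : (j < n + 1) ↔ (j < n) := by omega
    simp [hje, h1]

lemma inner_aux (m : String) (N : Nat) :
    ∀ (n : Nat), n ≤ N → ∀ (gA gG gC gT : Nat → Int),
    (PySem.List.pyRange 0 (n : Int) 1).foldl
        (fun p i => pvStep p ((PySem.List.pyGet? m.toList i).getD '?') i)
        [(List.range N).map gA, (List.range N).map gG,
         (List.range N).map gC, (List.range N).map gT]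
      = [(List.range N).map (fun j => gA j + if j < n ∧ (PySem.List.pyGet? m.toList (j : Int)).getD '?' = 'A' then 1 else 0),
         (List.range N).map (fun j => gG j + if j < n ∧ (PySem.List.pyGet? m.toList (j : Int)).getD '?' = 'G' then 1 else 0),
         (List.range N).map (fun j => gC j + if j < n ∧ (PySem.List.pyGet? m.toList (j : Int)).getD '?' = 'C' then 1 else 0),
         (List.range N).map (fun j => gT j + if j < n ∧ (PySem.List.pyGet? m.toList (j : Int)).getD '?' = 'T' then 1 else 0)] := by
  intro n
  induction n with
  | zero =>
    intro _ gA gG gC gT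
    rw [PySem.List.pyRange_one_eq_nil (by omega)]
    simp
  | succ n ih =>
    intro hn gA gG gC gT
    have hcast : ((n + 1 : Nat) : Int) = (n : Int) + 1 := by push_cast; ring
    rw [hcast, PySem.List.pyRange_one_succ_right (by omega), List.foldl_append,
        ih (by omega), List.foldl_cons, List.foldl_nil,
        step_rows N n (by omega)]
    congr 1
    · exact row_combine (fun j => (PySem.List.pyGet? m.toList (j : Int)).getD '?') 'A' gA N n
    congr 1
    · exact row_combine (fun j => (PySem.List.pyGet? m.toList (j : Int)).getD '?') 'G' gG N n
    congr 1
    · exact row_combine (fun j => (PySem.List.pyGet? m.toList (j : Int)).getD '?') 'C' gC N n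
    congr 1
    exact row_combine (fun j => (PySem.List.pyGet? m.toList (j : Int)).getD '?') 'T' gT N n

lemma pyRange_toNat (k : Int) :
    PySem.List.pyRange 0 k 1 = PySem.List.pyRange 0 ((k.toNat : Nat) : Int) 1 := by
  by_cases h : k ≤ 0
  · rw [PySem.List.pyRange_one_eq_nil h, PySem.List.pyRange_one_eq_nil (by omega)]
  · rw [Int.toNat_of_nonneg (by omega)]

lemma profile_char (k : Int) (ml : List String) :
    pvGetProfile k ml
      = [(List.range k.toNat).map (fun (j : Nat) => 1 + pvCount ml (j : Int) 'A'),
         (List.range k.toNat).map (fun (j : Nat) => 1 + pvCount ml (j : Int) 'G'),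
         (List.range k.toNat).map (fun (j : Nat) => 1 + pvCount ml (j : Int) 'C'),
         (List.range k.toNat).map (fun (j : Nat) => 1 + pvCount ml (j : Int) 'T')] := by
  induction ml using List.reverseRecOn with
  | nil =>
    unfold pvGetProfile pvCount
    simp [List.map_const']
  | append_singleton ms m ih =>
    unfold pvGetProfile at ih ⊢
    rw [List.foldl_append, ih, List.foldl_cons, List.foldl_nil, pyRange_toNat,
        inner_aux m k.toNat k.toNat le_rfl]
    have hcnt : ∀ (j : Int) (c : Char),
        pvCount (ms ++ [m]) j c
          = pvCount ms j c + (if (PySem.List.pyGet? m.toList j).getD '?' = c then 1 else 0) := by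
      intro j c
      unfold pvCount
      rw [List.foldl_append, List.foldl_cons, List.foldl_nil]
    congr 1 <;> [skip; congr 1 <;> [skip; congr 1 <;> [skip; congr 1]]] <;>
    · apply List.map_congr_left
      intro j hj
      simp only [List.mem_range] at hj
      rw [hcnt]
      simp [hj]
      ring

lemma pvCount_nonneg_aux (j : Int) (c : Char) :
    ∀ (ml : List String) (a : Int), 0 ≤ a →
    0 ≤ ml.foldl (fun acc m => acc + (if (PySem.List.pyGet? m.toList j).getD '?' = c then 1 else 0)) a := by
  intro ml
  induction ml with
  | nil => intro a ha; simpa using ha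
  | cons m ms ih =>
    intro a ha
    rw [List.foldl_cons]
    apply ih
    split <;> omega

lemma pvCount_nonneg (ml : List String) (j : Int) (c : Char) : 0 ≤ pvCount ml j c :=
  pvCount_nonneg_aux j c ml 0 le_rfl

lemma col_eq (ml : List String) (k j : Int) (h0 : 0 ≤ j) (hk : j < k) :
    ((PySem.List.pyRange 0 4 1).foldl
        (fun st i =>
          let v := PySem.List.pyGetD (PySem.List.pyGetD (pvGetProfile k ml) i []) j 0
          if v > st.1 then (v, pvNuc i) else st)
        ((0 : Int), "")).2
      = String.ofList [(PySem.List.max? ['A','G','C','T'] (fun c => pvCount ml j c)).getD 'A'] := by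
  have h4 : PySem.List.pyRange 0 4 1 = [0, 1, 2, 3] := by decide
  have hjN : j.toNat < k.toNat := by omega
  have hrow : ∀ (c : Char),
      PySem.List.pyGetD ((List.range k.toNat).map (fun (i : Nat) => 1 + pvCount ml (i : Int) c)) j 0
        = 1 + pvCount ml j c := by
    intro c
    rw [PySem.List.pyGetD_of_nonneg _ _ h0, PySem.List.getD_map_range _ _ _ _ hjN,
        Int.toNat_of_nonneg h0]
  rw [h4, profile_char]
  simp only [List.foldl_cons, List.foldl_nil,
    PySem.List.pyGetD_ofNat', List.getD_cons_zero, List.getD_cons_succ, hrow]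
  have nA := pvCount_nonneg ml j 'A'
  have nG := pvCount_nonneg ml j 'G'
  have nC := pvCount_nonneg ml j 'C'
  have nT := pvCount_nonneg ml j 'T'
  have e0 : pvNuc 0 = "A" := by decide
  have e1 : pvNuc 1 = "G" := by decide
  have e2 : pvNuc 2 = "C" := by decide
  have e3 : pvNuc 3 = "T" := by decide
  simp only [PySem.List.max?, List.foldl_cons, List.foldl_nil, e0, e1, e2, e3]
  split_ifs <;> (try dsimp only) <;> (try split_ifs) <;> (try dsimp only) <;> (try split_ifs) <;> (try dsimp only) <;> first | decide | omega

lemma ofList_append_char (acc : List Char) (c : Char) :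
    String.ofList acc ++ String.ofList [c] = String.ofList (acc ++ [c]) := by
  simp

lemma foldl_ofList (g : Int → Char) :
    ∀ (l : List Int) (acc : List Char),
      l.foldl (fun s j => s ++ String.ofList [g j]) (String.ofList acc)
        = String.ofList (acc ++ l.map g) := by
  intro l
  induction l with
  | nil => intro acc; simp
  | cons x xs ih =>
    intro acc
    rw [List.foldl_cons, ofList_append_char, ih, List.map_cons]
    simp

lemma main_eq (k : Int) (ml : List String) :
    ((PySem.List.pyRange 0 k 1).foldl
      (fun consensus j =>
        let p := (PySem.List.pyRange 0 4 1).foldl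
          (fun st i =>
            let v := PySem.List.pyGetD (PySem.List.pyGetD (pvGetProfile k ml) i []) j 0
            if v > st.1 then (v, pvNuc i) else st)
          ((0 : Int), "")
        consensus ++ p.2) "")
    = String.ofList ((PySem.List.pyRange 0 k 1).map (fun j =>
        (PySem.List.max? ['A','G','C','T'] (fun c => pvCount ml j c)).getD 'A')) := by
  rw [PySem.List.foldl_congr_mem (PySem.List.pyRange 0 k 1) _
        (fun s j => s ++ String.ofList [(PySem.List.max? ['A','G','C','T'] (fun c => pvCount ml j c)).getD 'A']) ""
        (by
          intro acc j hj
          rw [PySem.List.mem_pyRange_one] at hj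
          dsimp only
          rw [col_eq ml k j hj.1 hj.2])]
  have h0 : ("" : String) = String.ofList [] := rfl
  rw [h0, foldl_ofList]
  simp


-- ===== VERDICT (by name: the statement is the Claim_ definition above) =====
theorem generate_consensus_spec : Claim_equal_generate_consensus := by
  intro k t ml _ _
  unfold Spec_generate_consensus generate_consensus generate_consensus_alt
  exact main_eq k ml
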